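-- pv_equiv track=rewrite | github.com/ShMonem/animSnapBases | utils/support.py | get_tetrahedrons_per_vert
-- ===== SOURCE A (Python) =====
-- def get_tetrahedrons_per_vert(vertex_indices, tets):
--     # Convert the list of vertex indices to a set for faster lookup
--     vertex_indices_set = set(vertex_indices)
--
--     # List to hold the tetrahedrons that include any of the specified vertices
--     matching_tet_indices = []
--     count = 0
--     # Iterate over each tetrahedron
--     for index, tet in enumerate(tets):
--         # Check if any vertex of the tetrahedron is in the vertex_indices_set
--         if any(vertex in vertex_indices_set for vertex in tet):
--             matching_tet_indices.append(index)
--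
--     return matching_tet_indices
-- ===== SOURCE B (Python) =====
-- def get_tetrahedrons_per_vert(vertex_indices, tets):
--     # Build an inverted index: vertex value -> list of tet indices containing it.
--     posting = {}
--     for i, tet in enumerate(tets):
--         for v in tet:
--             posting.setdefault(v, []).append(i)
--     # Union of the posting lists for the queried vertices.
--     hits = set()
--     for v in vertex_indices:
--         hits.update(posting.get(v, []))
--     return sorted(hits)
-- ===== Notes on version B (the rewrite author's own statement) =====
-- stated objective: alternative
-- what changed: B builds an inverted index (dict vertex -> list of tet indices) in one pass, unions the posting lists of the queried vertices into a set, and returns sorted(set), instead of A's scan of tets with a membership test against the query set.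
import Mathlib
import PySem

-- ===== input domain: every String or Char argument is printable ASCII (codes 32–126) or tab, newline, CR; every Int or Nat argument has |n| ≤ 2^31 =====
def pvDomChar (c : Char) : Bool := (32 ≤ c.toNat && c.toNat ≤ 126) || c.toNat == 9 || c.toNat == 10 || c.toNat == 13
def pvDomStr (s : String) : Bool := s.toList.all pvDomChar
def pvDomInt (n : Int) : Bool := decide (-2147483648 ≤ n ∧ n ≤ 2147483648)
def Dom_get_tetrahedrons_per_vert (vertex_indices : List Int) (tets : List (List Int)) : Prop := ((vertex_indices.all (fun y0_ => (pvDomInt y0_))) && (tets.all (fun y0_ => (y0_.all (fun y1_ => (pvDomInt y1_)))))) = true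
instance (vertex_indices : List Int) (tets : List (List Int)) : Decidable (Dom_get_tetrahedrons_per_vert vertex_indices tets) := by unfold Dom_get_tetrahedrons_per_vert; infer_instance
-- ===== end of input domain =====

-- B replaces A's scan-with-membership-test by an inverted index (vertex → posting list of
-- tet indices) whose posting lists are unioned into a set and sorted; alternative decomposition, same cost.

-- ===== PORT A =====
-- Literal port of A: set of queried vertices, then one pass over enumerate(tets) appending
-- the index whenever any vertex of the tet is in the set.  (A's unused 'count = 0' is dead code.)
def get_tetrahedrons_per_vert (vertex_indices : List Int) (tets : List (List Int)) : List Int :=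
  let vertex_indices_set : PySem.Set Int := PySem.Set.ofList vertex_indices
  (PySem.List.enumerate tets 0).foldl
    (fun matching_tet_indices p =>
      if p.2.any (fun vertex => PySem.Set.contains vertex_indices_set vertex) then
        matching_tet_indices ++ [p.1]
      else matching_tet_indices) []

-- ===== PORT B =====
-- Literal port of B: posting.setdefault(v, []).append(i) is Dict.modify v [] (· ++ [i]);
-- hits.update(posting.get(v, [])) is Set.update; sorted(hits) is PySem.List.sorted.
def get_tetrahedrons_per_vert_alt (vertex_indices : List Int) (tets : List (List Int)) : List Int :=
  let posting : PySem.Dict Int (List Int) :=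
    (PySem.List.enumerate tets 0).foldl
      (fun d p => p.2.foldl (fun d v => d.modify v [] (· ++ [p.1])) d)
      PySem.Dict.empty
  let hits : PySem.Set Int :=
    vertex_indices.foldl (fun s v => PySem.Set.update s (posting.getD v [])) PySem.Set.empty
  PySem.List.sorted hits (fun x => x) false

-- ===== PRECONDITION & SPEC =====
def Spec_get_tetrahedrons_per_vert (vertex_indices : List Int) (tets : List (List Int)) (out : List Int) : Prop := out = get_tetrahedrons_per_vert_alt vertex_indices tets
instance (vertex_indices : List Int) (tets : List (List Int)) (out : List Int) : Decidable (Spec_get_tetrahedrons_per_vert vertex_indices tets out) := by unfold Spec_get_tetrahedrons_per_vert; infer_instance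

-- ===== CLAIM (what is proved, stated in full; the proofs are below) =====
def Claim_equal_get_tetrahedrons_per_vert : Prop := ∀ (vertex_indices : List Int) (tets : List (List Int)), Dom_get_tetrahedrons_per_vert vertex_indices tets → Spec_get_tetrahedrons_per_vert vertex_indices tets (get_tetrahedrons_per_vert vertex_indices tets)

-- ===== LEMMAS AND PROOFS =====

-- A's loop is the filtered-and-mapped enumerate list.
theorem portA_eq (vertex_indices : List Int) (tets : List (List Int)) :
    get_tetrahedrons_per_vert vertex_indices tets =
      ((PySem.List.enumerate tets 0).filter
        (fun p => p.2.any (fun v => PySem.Set.contains (PySem.Set.ofList vertex_indices) v))).map (·.1) := by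
  unfold get_tetrahedrons_per_vert
  simpa using PySem.List.foldl_append_if
    (fun p : Int × List Int => p.2.any (fun v => PySem.Set.contains (PySem.Set.ofList vertex_indices) v))
    (fun p : Int × List Int => p.1) (PySem.List.enumerate tets 0) []

-- B's posting dict, read back at any key c.
theorem posting_getD (tets : List (List Int)) (c : Int) :
    ((PySem.List.enumerate tets 0).foldl
        (fun d p => p.2.foldl (fun d v => d.modify v [] (· ++ [p.1])) d)
        (PySem.Dict.empty : PySem.Dict Int (List Int))).getD c []
      = (((PySem.List.enumerate tets 0).flatMap (fun p => p.2.map (fun v => (v, p.1)))).filter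
          (fun q => q.1 == c)).map (·.2) := by
  have h : ∀ (L : List (Int × List Int)) (d : PySem.Dict Int (List Int)),
      L.foldl (fun d p => p.2.foldl (fun d v => d.modify v [] (· ++ [p.1])) d) d
        = (L.flatMap (fun p => p.2.map (fun v => (v, p.1)))).foldl
            (fun d q => d.modify q.1 [] (· ++ [q.2])) d := by
    intro L
    induction L with
    | nil => intro d; rfl
    | cons p L ih =>
      intro d
      simp only [List.foldl_cons, List.flatMap_cons, List.foldl_append, List.foldl_map, ih]
  rw [h, PySem.Dict.getD_foldl_modify_append]
  simp

-- A's result list and the union of the posting lists over the query have the same members.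
theorem memA_iff (vertex_indices : List Int) (tets : List (List Int)) (i : Int) :
    (i ∈ ((PySem.List.enumerate tets 0).filter
        (fun p => p.2.any (fun v => PySem.Set.contains (PySem.Set.ofList vertex_indices) v))).map (·.1))
    ↔ (∃ v ∈ vertex_indices,
        i ∈ ((((PySem.List.enumerate tets 0).flatMap (fun p => p.2.map (fun w => (w, p.1)))).filter
          (fun q => q.1 == v)).map (·.2))) := by
  simp only [List.mem_map, List.mem_filter, List.any_eq_true, PySem.Set.contains_iff,
    PySem.Set.mem_ofList, List.mem_flatMap, beq_iff_eq]
  constructor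
  · rintro ⟨p, ⟨hp, v, hv, hvq⟩, rfl⟩
    exact ⟨v, hvq, ⟨(v, p.1), ⟨⟨p, hp, ⟨v, hv, rfl⟩⟩, rfl⟩, rfl⟩⟩
  · rintro ⟨v, hvq, q, ⟨⟨p, hp, w, hw, rfl⟩, hqc⟩, rfl⟩
    have hwv : w = v := hqc
    exact ⟨p, ⟨hp, w, hw, hwv ▸ hvq⟩, rfl⟩

-- Membership after the hits-accumulating loop.
theorem mem_hits_loop (g : Int → List Int) (l : List Int) (s : PySem.Set Int) (i : Int) :
    i ∈ l.foldl (fun s v => PySem.Set.update s (g v)) s ↔ i ∈ s ∨ ∃ v ∈ l, i ∈ g v := by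
  induction l generalizing s with
  | nil => simp
  | cons x xs ih =>
    simp only [List.foldl_cons, ih, PySem.Set.mem_update, List.mem_cons]
    constructor
    · rintro (⟨h | h⟩ | ⟨v, hv, hi⟩)
      · exact Or.inl h
      · exact Or.inr ⟨x, Or.inl rfl, h⟩
      · exact Or.inr ⟨v, Or.inr hv, hi⟩
    · rintro (h | ⟨v, (rfl | hv), hi⟩)
      · exact Or.inl (Or.inl h)
      · exact Or.inl (Or.inr hi)
      · exact Or.inr ⟨v, hv, hi⟩

theorem nodup_hits_loop (g : Int → List Int) (l : List Int) (s : PySem.Set Int)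
    (hs : s.Nodup) :
    (l.foldl (fun s v => PySem.Set.update s (g v)) s).Nodup := by
  induction l generalizing s with
  | nil => exact hs
  | cons x xs ih => exact ih _ (PySem.Set.nodup_update _ _ hs)

theorem pairwiseA (vertex_indices : List Int) (tets : List (List Int)) :
    List.Pairwise (· < ·) (((PySem.List.enumerate tets 0).filter
      (fun p => p.2.any (fun v => PySem.Set.contains (PySem.Set.ofList vertex_indices) v))).map (·.1)) :=
  List.Pairwise.map _ (fun _ _ h => h)
    ((PySem.List.pairwise_lt_enumerate tets 0).filter _)

-- ===== VERDICT (by name: the statement is the Claim_ definition above) =====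
theorem get_tetrahedrons_per_vert_spec : Claim_equal_get_tetrahedrons_per_vert := by
  intro vertex_indices tets _
  unfold Spec_get_tetrahedrons_per_vert
  rw [portA_eq]
  unfold get_tetrahedrons_per_vert_alt
  symm
  apply PySem.List.sorted_eq_of_perm_of_pairwise_lt
  · -- same members, both without duplicates
    refine (List.perm_ext_iff_of_nodup
      (List.Pairwise.imp ne_of_lt (pairwiseA vertex_indices tets))
      (nodup_hits_loop _ _ _ List.nodup_nil)).mpr ?_
    intro i
    rw [mem_hits_loop]
    simp only [posting_getD, List.not_mem_nil, false_or]
    exact memA_iff vertex_indices tets i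
  · exact pairwiseA vertex_indices tets
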